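-- pv_equiv track=rewrite | github.com/AprajitaChhawi/365DaysOfCode.JULY | Day 30 case specific sorting of strings.py | caseSort
-- ===== SOURCE A (Python) =====
-- def caseSort(s,n):
--     case=[]
--     lower=[]
--     upper=[]
--     for i in s:
--         if i.isupper():
--             case.append('U')
--             upper.append(i)
--         else:
--             case.append('L')
--             lower.append(i)
--     upper.sort()
--     lower.sort()
--     idx=0
--     s=''
--     for i in case:
--         if i=='U':
--             s=s+upper.pop(0)
--         else:
--             s=s+lower.pop(0)
--         idx=idx+1
--     return s
-- ===== SOURCE B (Python) =====
-- def caseSort(s, n):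
--     # Counting sort (no comparison sort): tally each group's characters into
--     # 128-slot ASCII count tables, then rebuild s in one pass, pulling the next
--     # smallest remaining character of the matching group via a monotone pointer.
--     cu = [0] * 128
--     cl = [0] * 128
--     for c in s:
--         if c.isupper():
--             cu[ord(c)] += 1
--         else:
--             cl[ord(c)] += 1
--     out = []
--     pu = 0
--     pl = 0
--     for c in s:
--         if c.isupper():
--             while cu[pu] == 0:
--                 pu += 1
--             cu[pu] -= 1
--             out.append(chr(pu))
--         else:
--             while cl[pl] == 0:
--                 pl += 1
--             cl[pl] -= 1
--             out.append(chr(pl))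
--     return ''.join(out)
-- ===== Notes on version B (the rewrite author's own statement) =====
-- stated objective: faster
-- what changed: B replaces A's tag list, two comparison sorts and quadratic pop(0)/string-concat rebuild by a counting sort: two 128-slot ASCII tally tables built in one pass, then one pass over s that emits the next smallest remaining character of the matching group via a monotone bucket pointer.
import Mathlib
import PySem

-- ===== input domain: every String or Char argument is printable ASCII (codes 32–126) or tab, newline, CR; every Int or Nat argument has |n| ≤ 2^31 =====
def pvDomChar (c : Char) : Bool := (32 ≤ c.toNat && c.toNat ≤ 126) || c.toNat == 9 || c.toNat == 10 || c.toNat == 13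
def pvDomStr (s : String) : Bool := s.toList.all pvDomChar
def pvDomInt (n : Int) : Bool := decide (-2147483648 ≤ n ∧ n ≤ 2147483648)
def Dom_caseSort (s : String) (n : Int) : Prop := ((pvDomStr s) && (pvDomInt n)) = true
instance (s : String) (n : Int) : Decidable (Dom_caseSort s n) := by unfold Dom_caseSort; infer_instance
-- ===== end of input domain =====

-- B replaces A's two comparison sorts and quadratic pop(0)/string-concat rebuild by a
-- counting sort over two 128-slot ASCII tally tables consumed by monotone bucket pointers
-- (objective: faster).


-- ===== PORT A =====
-- second for-loop of A: consume the front of the sorted queues according to the tag list;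
-- the `none` branches are unreachable in Python (pop(0) on the matching-length queue) and
-- only make the recursion total. idx is A's dead counter.
def caseSortLoop2 : List Char → List Char → List Char → List Char → Int → List Char
  | [], _, _, acc, _ => acc
  | i :: rest, up, lo, acc, idx =>
    if i = 'U' then
      match PySem.List.pop? up 0 with
      | some (u, ut) => caseSortLoop2 rest ut lo (acc ++ [u]) (idx + 1)
      | none => acc
    else
      match PySem.List.pop? lo 0 with
      | some (l, lt) => caseSortLoop2 rest up lt (acc ++ [l]) (idx + 1)
      | none => acc

def caseSort (s : String) (n : Int) : String :=
  let st := s.toList.foldl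
    (fun (st : List Char × List Char × List Char) i =>
      if PySem.Chars.isupper i then (st.1 ++ ['U'], st.2.1, st.2.2 ++ [i])
      else (st.1 ++ ['L'], st.2.1 ++ [i], st.2.2))
    ([], [], [])
  let case := st.1
  let lower := PySem.List.sorted st.2.1 (fun c => c) false
  let upper := PySem.List.sorted st.2.2 (fun c => c) false
  String.mk (caseSortLoop2 case upper lower [] 0)

-- ===== PORT B =====
-- `while cnt[p] == 0: p += 1`. The `p ≥ len` branch is Python's IndexError, unreachable on
-- Dom (a nonzero slot remains whenever the loop is entered); it only makes the recursion total.
def bFindAux : List Int → Nat → Nat → Nat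
  | _, p, 0 => p
  | cnt, p, fuel + 1 => if cnt.getD p 0 = 0 then bFindAux cnt (p + 1) fuel else p

def bFind (cnt : List Int) (p : Nat) : Nat := bFindAux cnt p (cnt.length - p)

-- first for-loop of B: tally each character into its group's 128-slot table
-- (index ord(c) is in range on Dom; List.set/getD are exact there).
def bCounts (l : List Char) : List Int × List Int :=
  l.foldl
    (fun (st : List Int × List Int) c =>
      if PySem.Chars.isupper c then (st.1.set c.toNat (st.1.getD c.toNat 0 + 1), st.2)
      else (st.1, st.2.set c.toNat (st.2.getD c.toNat 0 + 1)))
    (List.replicate 128 0, List.replicate 128 0)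

-- second for-loop of B: advance the matching group's pointer to the next nonzero slot,
-- decrement it and emit chr(pointer).
def bLoop : List Char → List Int → Nat → List Int → Nat → List Char
  | [], _, _, _, _ => []
  | c :: rest, cu, pu, cl, pl =>
    if PySem.Chars.isupper c then
      let q := bFind cu pu
      Char.ofNat q :: bLoop rest (cu.set q (cu.getD q 0 - 1)) q cl pl
    else
      let q := bFind cl pl
      Char.ofNat q :: bLoop rest cu pu (cl.set q (cl.getD q 0 - 1)) q

def caseSort_alt (s : String) (n : Int) : String :=
  let cnts := bCounts s.toList
  String.mk (bLoop s.toList cnts.1 0 cnts.2 0)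

-- ===== PRECONDITION & SPEC =====
def Spec_caseSort (s : String) (n : Int) (out : String) : Prop := out = caseSort_alt s n
instance (s : String) (n : Int) (out : String) : Decidable (Spec_caseSort s n out) := by unfold Spec_caseSort; infer_instance

-- ===== CLAIM (what is proved, stated in full; the proofs are below) =====
def Claim_equal_caseSort : Prop := ∀ (s : String) (n : Int), Dom_caseSort s n → Spec_caseSort s n (caseSort s n)

-- ===== LEMMAS AND PROOFS =====

-- Char / list helpers
theorem pvToNat_ofNat (i : Nat) (h : i < 128) : (Char.ofNat i).toNat = i := by
  have : Nat.isValidChar i := Or.inl (by omega)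
  simp [Char.toNat, Char.ofNat, Char.ofNatAux, this]

theorem pvChar_le_iff (a b : Char) : a ≤ b ↔ a.toNat ≤ b.toNat := by
  rw [Char.le_def, UInt32.le_iff_toNat_le]; rfl

theorem pvChar_eq_iff (a b : Char) : a = b ↔ a.toNat = b.toNat := by
  constructor
  · intro h; rw [h]
  · intro h; exact Char.ext (UInt32.toNat_inj.mp h)

theorem pvGetD_set (a : List Int) (j i : Nat) (v : Int) :
    (a.set j v).getD i 0 = if j = i ∧ j < a.length then v else a.getD i 0 := by
  simp [List.getD_eq_getElem?_getD, List.getElem?_set]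
  split_ifs with h1 h2 <;> first | (simp_all; omega) | simp_all

-- proof-side vocabulary
def pvTag (c : Char) : Char := if PySem.Chars.isupper c then 'U' else 'L'

def mergeTags : List Char → List Char → List Char → List Char
  | [], _, _ => []
  | c :: rest, us, ls =>
    if PySem.Chars.isupper c then
      match us with
      | u :: ut => u :: mergeTags rest ut ls
      | [] => []
    else
      match ls with
      | l :: lt => l :: mergeTags rest us lt
      | [] => []

def extract : List Int → Nat → Nat → List Char
  | _, _, 0 => []
  | cnt, p, k + 1 =>
    let q := bFind cnt p
    Char.ofNat q :: extract (cnt.set q (cnt.getD q 0 - 1)) q k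

def countsOf (m : List Char) : List Int :=
  m.foldl (fun a c => a.set c.toNat (a.getD c.toNat 0 + 1)) (List.replicate 128 0)

def listOfFrom (cnt : List Int) (p : Nat) : List Char :=
  (List.range' p (128 - p)).flatMap
    (fun i => List.replicate (cnt.getD i 0).toNat (Char.ofNat i))

-- ===== A-side =====
theorem caseSort_loop1_eq (l : List Char) (cs los ups : List Char) :
    l.foldl
      (fun (st : List Char × List Char × List Char) i =>
        if PySem.Chars.isupper i then (st.1 ++ ['U'], st.2.1, st.2.2 ++ [i])
        else (st.1 ++ ['L'], st.2.1 ++ [i], st.2.2))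
      (cs, los, ups)
    = (cs ++ l.map pvTag, los ++ l.filter (fun c => !PySem.Chars.isupper c),
       ups ++ l.filter (fun c => PySem.Chars.isupper c)) := by
  induction l generalizing cs los ups with
  | nil => simp
  | cons c rest ih =>
    by_cases h : PySem.Chars.isupper c = true <;>
      simp [List.foldl_cons, h, ih, pvTag]

theorem caseSort_loop2_eq (l : List Char) (up lo acc : List Char) (idx : Int) :
    caseSortLoop2 (l.map pvTag) up lo acc idx = acc ++ mergeTags l up lo := by
  induction l generalizing up lo acc idx with
  | nil => simp [caseSortLoop2, mergeTags]
  | cons c rest ih =>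
    by_cases h : PySem.Chars.isupper c = true
    · cases up with
      | nil => simp [caseSortLoop2, mergeTags, pvTag, h, PySem.List.pop?]
      | cons u ut =>
        simp [caseSortLoop2, mergeTags, pvTag, h, PySem.List.pop?_zero_cons, ih]
    · cases lo with
      | nil => simp [caseSortLoop2, mergeTags, pvTag, h, PySem.List.pop?]
      | cons v vt =>
        simp [caseSortLoop2, mergeTags, pvTag, h, PySem.List.pop?_zero_cons, ih]

-- ===== B-side =====
theorem bCounts_gen (l : List Char) (a b : List Int) :
    l.foldl
      (fun (st : List Int × List Int) c =>
        if PySem.Chars.isupper c then (st.1.set c.toNat (st.1.getD c.toNat 0 + 1), st.2)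
        else (st.1, st.2.set c.toNat (st.2.getD c.toNat 0 + 1)))
      (a, b)
    = ((l.filter (fun c => PySem.Chars.isupper c)).foldl
         (fun a c => a.set c.toNat (a.getD c.toNat 0 + 1)) a,
       (l.filter (fun c => !PySem.Chars.isupper c)).foldl
         (fun a c => a.set c.toNat (a.getD c.toNat 0 + 1)) b) := by
  induction l generalizing a b with
  | nil => simp
  | cons c rest ih =>
    rw [List.foldl_cons, List.filter_cons, List.filter_cons]
    by_cases h : PySem.Chars.isupper c = true
    · simp only [h, Bool.not_true, if_true, Bool.false_eq_true, if_false]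
      rw [List.foldl_cons]
      exact ih _ _
    · simp only [Bool.not_eq_true] at h
      simp only [h, Bool.false_eq_true, if_false, Bool.not_false, if_true]
      rw [List.foldl_cons]
      exact ih _ _

theorem length_foldl_set (m : List Char) (a : List Int) :
    (m.foldl (fun a c => a.set c.toNat (a.getD c.toNat 0 + 1)) a).length = a.length := by
  induction m generalizing a with
  | nil => rfl
  | cons c rest ih => rw [List.foldl_cons, ih, List.length_set]

theorem getD_foldl_set (m : List Char) (a : List Int) (hlen : a.length = 128)
    (hm : ∀ c ∈ m, c.toNat < 128) (i : Nat) :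
    (m.foldl (fun a c => a.set c.toNat (a.getD c.toNat 0 + 1)) a).getD i 0
      = a.getD i 0 + (m.countP (fun c => c.toNat == i) : Int) := by
  induction m generalizing a with
  | nil => simp
  | cons c rest ih =>
    have hc : c.toNat < 128 := hm c (by simp)
    rw [List.foldl_cons, ih _ (by simp [hlen]) (fun x hx => hm x (by simp [hx]))]
    rw [pvGetD_set, List.countP_cons]
    by_cases h : c.toNat = i
    · simp only [h, beq_self_eq_true, if_true, hlen, true_and]
      rw [if_pos (by omega)]
      push_cast; ring
    · have hb : (c.toNat == i) = false := by simpa using h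
      simp only [hb, if_false, h, false_and]
      push_cast; ring

theorem countsOf_length (m : List Char) : (countsOf m).length = 128 := by
  unfold countsOf; rw [length_foldl_set]; simp

theorem getD_countsOf (m : List Char) (hm : ∀ c ∈ m, c.toNat < 128) (i : Nat) :
    (countsOf m).getD i 0 = (m.countP (fun c => c.toNat == i) : Int) := by
  unfold countsOf
  rw [getD_foldl_set m _ (by simp) hm i]
  rw [List.getD_eq_getElem?_getD, List.getElem?_replicate]
  split_ifs <;> simp

theorem countsOf_nonneg (m : List Char) (hm : ∀ c ∈ m, c.toNat < 128) (i : Nat) :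
    0 ≤ (countsOf m).getD i 0 := by
  rw [getD_countsOf m hm i]; positivity

-- bFind specification
theorem bFindAux_spec (cnt : List Int) :
    ∀ (fuel p : Nat), p + fuel = cnt.length →
      p ≤ bFindAux cnt p fuel ∧ bFindAux cnt p fuel ≤ cnt.length ∧
      (∀ j, p ≤ j → j < bFindAux cnt p fuel → cnt.getD j 0 = 0) ∧
      (bFindAux cnt p fuel < cnt.length → cnt.getD (bFindAux cnt p fuel) 0 ≠ 0) := by
  intro fuel
  induction fuel with
  | zero =>
    intro p hp
    rw [bFindAux]
    exact ⟨le_refl _, by omega, fun j hj1 hj2 => absurd hj2 (by omega),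
      fun hlt => absurd hlt (by omega)⟩
  | succ f ih =>
    intro p hp
    rw [bFindAux]
    by_cases h : cnt.getD p 0 = 0
    · simp only [h, if_true]
      obtain ⟨h1, h2, h3, h4⟩ := ih (p + 1) (by omega)
      refine ⟨by omega, h2, ?_, h4⟩
      intro j hj1 hj2
      rcases Nat.eq_or_lt_of_le hj1 with rfl | hlt
      · exact h
      · exact h3 j hlt hj2
    · simp only [h, if_false]
      exact ⟨le_refl _, by omega, fun j hj1 hj2 => by omega, fun _ => h⟩

-- listOfFrom structure
theorem listOfFrom_ge (cnt : List Int) (p : Nat) (h : 128 ≤ p) : listOfFrom cnt p = [] := by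
  unfold listOfFrom
  have : 128 - p = 0 := by omega
  simp [this]

theorem listOfFrom_step (cnt : List Int) (p : Nat) (h : p < 128) :
    listOfFrom cnt p
      = List.replicate (cnt.getD p 0).toNat (Char.ofNat p) ++ listOfFrom cnt (p + 1) := by
  unfold listOfFrom
  have h1 : 128 - p = (128 - (p + 1)) + 1 := by omega
  rw [h1, List.range'_succ]
  simp [List.flatMap_cons]

theorem listOfFrom_congr (cnt cnt' : List Int) (p : Nat)
    (h : ∀ i, p ≤ i → i < 128 → cnt.getD i 0 = cnt'.getD i 0) :
    listOfFrom cnt p = listOfFrom cnt' p := by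
  unfold listOfFrom
  rw [List.flatMap_def, List.flatMap_def]
  congr 1
  apply List.map_congr_left
  intro i hi
  rw [List.mem_range'_1] at hi
  rw [h i hi.1 (by omega)]

theorem listOfFrom_skip (cnt : List Int) :
    ∀ (d p : Nat), p + d ≤ 128 → (∀ j, p ≤ j → j < p + d → cnt.getD j 0 = 0) →
      listOfFrom cnt p = listOfFrom cnt (p + d) := by
  intro d
  induction d with
  | zero => intro p _ _; rfl
  | succ e ih =>
    intro p hd hz
    have h0 : cnt.getD p 0 = 0 := hz p (le_refl _) (by omega)
    rw [listOfFrom_step cnt p (by omega), h0]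
    simp only [Int.toNat_zero, List.replicate_zero, List.nil_append]
    have := ih (p + 1) (by omega) (fun j hj1 hj2 => hz j (by omega) (by omega))
    rw [this]
    congr 1
    omega

theorem listOfFrom_pop (cnt : List Int) (q : Nat) (hlen : cnt.length = 128) (hq : q < 128)
    (he : 1 ≤ cnt.getD q 0) :
    listOfFrom cnt q = Char.ofNat q :: listOfFrom (cnt.set q (cnt.getD q 0 - 1)) q := by
  rw [listOfFrom_step cnt q hq, listOfFrom_step _ q hq]
  have h1 : (cnt.set q (cnt.getD q 0 - 1)).getD q 0 = cnt.getD q 0 - 1 := by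
    rw [pvGetD_set]; simp [hlen, hq]
  have h2 : listOfFrom (cnt.set q (cnt.getD q 0 - 1)) (q + 1) = listOfFrom cnt (q + 1) := by
    apply listOfFrom_congr
    intro i hi _
    rw [pvGetD_set]
    simp only [hlen]
    split_ifs with h <;> [omega; rfl]
  rw [h1, h2]
  have h3 : (cnt.getD q 0).toNat = (cnt.getD q 0 - 1).toNat + 1 := by omega
  rw [h3, List.replicate_succ]
  simp

-- extraction = listOfFrom
theorem extract_eq : ∀ (k : Nat) (cnt : List Int) (p : Nat), cnt.length = 128 → p ≤ 128 →
    (∀ i, 0 ≤ cnt.getD i 0) → k = (listOfFrom cnt p).length →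
    extract cnt p k = listOfFrom cnt p := by
  intro k
  induction k with
  | zero =>
    intro cnt p _ _ _ hk
    rw [extract, Eq.comm, ← List.length_eq_zero_iff, ← hk]
  | succ k ih =>
    intro cnt p hlen hp hnn hk
    obtain ⟨h1, h2, h3, h4⟩ := bFindAux_spec cnt (cnt.length - p) p (by omega)
    have hq : bFindAux cnt p (cnt.length - p) = bFind cnt p := rfl
    rw [hq] at h1 h2 h3 h4
    set q := bFind cnt p with hqdef
    have hq128 : q ≤ 128 := by omega
    have hskip : listOfFrom cnt p = listOfFrom cnt q := by
      have h := listOfFrom_skip cnt (q - p) p (by omega)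
        (fun j hj1 hj2 => h3 j hj1 (by omega))
      rw [h]
      congr 1
      omega
    by_cases hqlt : q < 128
    · have hne : cnt.getD q 0 ≠ 0 := h4 (by omega)
      have he : 1 ≤ cnt.getD q 0 := by have := hnn q; omega
      have hpop := listOfFrom_pop cnt q hlen hqlt he
      rw [extract]
      simp only [← hqdef]
      rw [hskip, hpop]
      congr 1
      apply ih
      · simp [hlen]
      · omega
      · intro i
        rw [pvGetD_set]
        split_ifs with h
        · omega
        · exact hnn i
      · have hlen2 : (listOfFrom cnt p).length = k + 1 := hk.symm
        rw [hskip, hpop] at hlen2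
        simpa using hlen2.symm
    · exfalso
      have hnil : listOfFrom cnt q = [] := listOfFrom_ge cnt q (by omega)
      rw [hskip, hnil] at hk
      simp at hk

-- listOfFrom of a count table is the sorted list
theorem mem_listOfFrom (cnt : List Int) (p : Nat) (c : Char) (h : c ∈ listOfFrom cnt p) :
    ∃ i, p ≤ i ∧ i < 128 ∧ c = Char.ofNat i := by
  unfold listOfFrom at h
  rw [List.mem_flatMap] at h
  obtain ⟨i, hi, hc⟩ := h
  rw [List.mem_range'_1] at hi
  exact ⟨i, hi.1, by omega, List.eq_of_mem_replicate hc⟩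

theorem pairwise_listOfFrom (cnt : List Int) :
    ∀ (n p : Nat), 128 - p ≤ n → (listOfFrom cnt p).Pairwise (· ≤ ·) := by
  intro n
  induction n with
  | zero => intro p hp; rw [listOfFrom_ge cnt p (by omega)]; exact List.Pairwise.nil
  | succ m ih =>
    intro p hp
    by_cases h : p < 128
    · rw [listOfFrom_step cnt p h]
      rw [List.pairwise_append]
      refine ⟨List.pairwise_replicate.mpr (Or.inr (le_refl _)), ih (p + 1) (by omega), ?_⟩
      intro x hx y hy
      have hxe := List.eq_of_mem_replicate hx
      obtain ⟨i, hi1, hi2, rfl⟩ := mem_listOfFrom cnt (p + 1) y hy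
      subst hxe
      rw [pvChar_le_iff, pvToNat_ofNat p (by omega), pvToNat_ofNat i (by omega)]
      omega
    · rw [listOfFrom_ge cnt p (by omega)]; exact List.Pairwise.nil

theorem count_listOfFrom (cnt : List Int) (c : Char) :
    ∀ (n p : Nat), 128 - p ≤ n →
      (listOfFrom cnt p).count c
        = if p ≤ c.toNat ∧ c.toNat < 128 then (cnt.getD c.toNat 0).toNat else 0 := by
  intro n
  induction n with
  | zero =>
    intro p hp
    rw [listOfFrom_ge cnt p (by omega)]
    have h0 : ¬ (p ≤ c.toNat ∧ c.toNat < 128) := by omega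
    simp [h0]
  | succ m ih =>
    intro p hp
    by_cases h : p < 128
    · rw [listOfFrom_step cnt p h, List.count_append, List.count_replicate,
        ih (p + 1) (by omega)]
      have hcp := pvToNat_ofNat p (by omega)
      by_cases hc : c = Char.ofNat p
      · subst hc
        simp only [beq_self_eq_true, if_true, hcp]
        rw [if_neg (by omega), if_pos (by omega)]
        omega
      · have hb : (Char.ofNat p == c) = false := by
          simp only [beq_eq_false_iff_ne, ne_eq]
          exact fun hh => hc hh.symm
        have hne : c.toNat ≠ p := by
          intro hh
          exact hc ((pvChar_eq_iff c (Char.ofNat p)).mpr (by rw [hcp, hh]))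
        rw [hb]
        simp only [Bool.false_eq_true, if_false, Nat.zero_add]
        split_ifs <;> omega
    · rw [listOfFrom_ge cnt p (by omega)]
      have h0 : ¬ (p ≤ c.toNat ∧ c.toNat < 128) := by omega
      simp [h0]

theorem perm_listOfFrom_countsOf (m : List Char) (hm : ∀ c ∈ m, c.toNat < 128) :
    (listOfFrom (countsOf m) 0).Perm m := by
  rw [List.perm_iff_count]
  intro c
  rw [count_listOfFrom (countsOf m) c 128 0 (by omega)]
  by_cases h : c.toNat < 128
  · simp only [Nat.zero_le, h, and_true, if_true]
    rw [getD_countsOf m hm c.toNat]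
    rw [Int.toNat_natCast]
    rw [List.count_eq_countP]
    apply List.countP_congr
    intro a _
    simp only [beq_iff_eq]
    constructor <;> intro ha
    · exact (pvChar_eq_iff a c).mpr ha
    · exact (pvChar_eq_iff a c).mp ha
  · simp only [h, and_false, if_false]
    symm
    rw [List.count_eq_zero]
    intro hc
    exact h (hm c hc)

theorem sorted_eq_listOfFrom (m : List Char) (hm : ∀ c ∈ m, c.toNat < 128) :
    PySem.List.sorted m (fun c => c) false = listOfFrom (countsOf m) 0 := by
  apply PySem.List.sorted_id_eq_of_perm_of_pairwise
  · exact perm_listOfFrom_countsOf m hm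
  · exact pairwise_listOfFrom (countsOf m) 128 0 (by omega)

-- bLoop = tag-merge of the two extraction streams
theorem bLoop_eq (l : List Char) :
    ∀ (cu : List Int) (pu : Nat) (cl : List Int) (pl : Nat),
      bLoop l cu pu cl pl
        = mergeTags l (extract cu pu (l.countP (fun c => PySem.Chars.isupper c)))
            (extract cl pl (l.countP (fun c => !PySem.Chars.isupper c))) := by
  induction l with
  | nil => intro cu pu cl pl; simp [bLoop, mergeTags]
  | cons c rest ih =>
    intro cu pu cl pl
    by_cases h : PySem.Chars.isupper c = true
    · have hc1 : (c :: rest).countP (fun c => PySem.Chars.isupper c)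
          = rest.countP (fun c => PySem.Chars.isupper c) + 1 := by
        simp [h]
      have hc2 : (c :: rest).countP (fun c => !PySem.Chars.isupper c)
          = rest.countP (fun c => !PySem.Chars.isupper c) := by
        simp [h]
      rw [hc1, hc2]
      simp only [bLoop, h, if_true, extract, mergeTags]
      exact congrArg _ (ih _ _ _ _)
    · have hc1 : (c :: rest).countP (fun c => PySem.Chars.isupper c)
          = rest.countP (fun c => PySem.Chars.isupper c) := by
        simp [h]
      have hc2 : (c :: rest).countP (fun c => !PySem.Chars.isupper c)
          = rest.countP (fun c => !PySem.Chars.isupper c) + 1 := by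
        simp [h]
      rw [hc1, hc2]
      simp only [Bool.not_eq_true] at h
      simp only [bLoop, h, Bool.false_eq_true, if_false, extract, mergeTags]
      exact congrArg _ (ih _ _ _ _)

-- the extraction stream from a group's count table is the sorted group
theorem extract_countsOf (m : List Char) (hm : ∀ c ∈ m, c.toNat < 128) :
    extract (countsOf m) 0 m.length = PySem.List.sorted m (fun c => c) false := by
  have hk : m.length = (listOfFrom (countsOf m) 0).length :=
    ((perm_listOfFrom_countsOf m hm).length_eq).symm
  rw [extract_eq _ _ _ (countsOf_length m) (by omega) (countsOf_nonneg m hm) hk]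
  exact (sorted_eq_listOfFrom m hm).symm

-- assembly
theorem pv_main (s : String) (n : Int) (hd : Dom_caseSort s n) :
    caseSort s n = caseSort_alt s n := by
  have hm : ∀ c ∈ s.toList, c.toNat < 128 := by
    intro c hc
    have h1 : pvDomStr s = true := by
      unfold Dom_caseSort at hd
      simp at hd
      exact hd.1
    unfold pvDomStr at h1
    rw [List.all_eq_true] at h1
    have := h1 c hc
    unfold pvDomChar at this
    simp at this
    omega
  have hmU : ∀ c ∈ s.toList.filter (fun c => PySem.Chars.isupper c), c.toNat < 128 :=
    fun c hc => hm c (List.mem_of_mem_filter hc)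
  have hmL : ∀ c ∈ s.toList.filter (fun c => !PySem.Chars.isupper c), c.toNat < 128 :=
    fun c hc => hm c (List.mem_of_mem_filter hc)
  have hU : extract (countsOf (s.toList.filter (fun c => PySem.Chars.isupper c))) 0
        (s.toList.countP (fun c => PySem.Chars.isupper c))
      = PySem.List.sorted (s.toList.filter (fun c => PySem.Chars.isupper c)) (fun c => c) false := by
    rw [List.countP_eq_length_filter]
    exact extract_countsOf _ hmU
  have hL : extract (countsOf (s.toList.filter (fun c => !PySem.Chars.isupper c))) 0
        (s.toList.countP (fun c => !PySem.Chars.isupper c))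
      = PySem.List.sorted (s.toList.filter (fun c => !PySem.Chars.isupper c)) (fun c => c) false := by
    rw [List.countP_eq_length_filter]
    exact extract_countsOf _ hmL
  unfold caseSort caseSort_alt
  rw [caseSort_loop1_eq]
  simp only [List.nil_append]
  rw [caseSort_loop2_eq]
  simp only [List.nil_append]
  unfold bCounts
  rw [bCounts_gen, bLoop_eq]
  show String.mk (mergeTags s.toList
        (PySem.List.sorted (s.toList.filter (fun c => PySem.Chars.isupper c)) (fun c => c) false)
        (PySem.List.sorted (s.toList.filter (fun c => !PySem.Chars.isupper c)) (fun c => c) false))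
    = String.mk (mergeTags s.toList
        (extract (countsOf (s.toList.filter (fun c => PySem.Chars.isupper c))) 0
          (s.toList.countP (fun c => PySem.Chars.isupper c)))
        (extract (countsOf (s.toList.filter (fun c => !PySem.Chars.isupper c))) 0
          (s.toList.countP (fun c => !PySem.Chars.isupper c))))
  rw [hU, hL]

-- ===== VERDICT (by name: the statement is the Claim_ definition above) =====
theorem caseSort_spec : Claim_equal_caseSort := by
  intro s n hd
  exact pv_main s n hd
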